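-- pv_equiv track=rewrite | github.com/Lrelni/serpent | serpent/serpent_audio.py | accumulate_beats
-- ===== SOURCE A (Python) =====
-- def accumulate_beats(b):
--     """Helper function to make longer drums sound good
--     example:
--     [[1,0,0,1,1,0,1,1]]
--     => [[0,1,2,0,0,1,0,0]]
--     (each index is mapped to its distance from the last beat.)
--     the purpose of this is to let drums "ring" without being reset
--     during empty beats."""
--     final = []
--     for line in b:
--         accum = []
--         counter = 0
--         for x in line:
--             counter = (0 if x > 0 else counter + 1)
--             accum.append(counter)
--         final.append(accum)
--     return final
-- ===== SOURCE B (Python) =====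
-- def accumulate_beats(b):
--     """Run-based reimplementation: split each line into maximal runs of
--     beats (x > 0) and silence; a beat run of length k contributes k zeros,
--     a silence run of length k contributes 1..k (silence runs always start
--     fresh, since they follow a beat run or the start of the line)."""
--     final = []
--     for line in b:
--         accum = []
--         i = 0
--         n = len(line)
--         while i < n:
--             beat = line[i] > 0
--             j = i
--             while j < n and (line[j] > 0) == beat:
--                 j += 1
--             if beat:
--                 accum.extend([0] * (j - i))
--             else:
--                 accum.extend(range(1, j - i + 1))
--             i = j
--         final.append(accum)
--     return final
-- ===== Notes on version B (the rewrite author's own statement) =====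
-- stated objective: alternative
-- what changed: B replaces A's per-element running counter with a run-length decomposition: each line is split into maximal runs of beats/silence, a beat run of length k emits k zeros and a silence run emits 1..k.
import Mathlib
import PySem

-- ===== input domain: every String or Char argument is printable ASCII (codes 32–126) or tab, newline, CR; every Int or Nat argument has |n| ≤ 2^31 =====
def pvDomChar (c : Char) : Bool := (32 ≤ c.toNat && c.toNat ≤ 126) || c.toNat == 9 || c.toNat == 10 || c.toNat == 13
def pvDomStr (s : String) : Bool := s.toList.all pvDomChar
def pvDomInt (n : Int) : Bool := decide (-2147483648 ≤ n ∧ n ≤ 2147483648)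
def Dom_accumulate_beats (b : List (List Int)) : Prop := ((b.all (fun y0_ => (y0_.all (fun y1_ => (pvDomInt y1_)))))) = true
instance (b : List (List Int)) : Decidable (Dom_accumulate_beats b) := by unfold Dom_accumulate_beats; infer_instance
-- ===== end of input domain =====

-- B replaces A's per-element running counter with a run-length decomposition of each line (alternative, same cost).


-- ===== PORT A =====
-- inner loop: state (accum, counter); counter = 0 if x > 0 else counter+1, then append
def abLine (line : List Int) : List Int :=
  (line.foldl (fun (st : List Int × Int) x =>
      let counter : Int := if x > 0 then 0 else st.2 + 1
      (st.1 ++ [counter], counter)) ([], 0)).1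

def accumulate_beats (b : List (List Int)) : List (List Int) :=
  b.foldl (fun final line => final ++ [abLine line]) []

-- ===== PORT B =====
-- while loop over maximal runs: take the run of elements whose beat-ness equals the head's,
-- emit zeros for a beat run, 1..k for a silence run, recurse on the rest.
def abAltLine : List Int → List Int
  | [] => []
  | x :: xs =>
    let run := xs.takeWhile (fun y => decide (y > 0) == decide (x > 0))
    let k := run.length + 1
    (if x > 0 then List.replicate k (0 : Int)
     else (List.range k).map (fun i : Nat => (i : Int) + 1)) ++
      abAltLine (xs.dropWhile (fun y => decide (y > 0) == decide (x > 0)))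
termination_by l => l.length
decreasing_by
  have := xs.length_dropWhile_le (fun y => decide (y > 0) == decide (x > 0))
  simp only [List.length_cons]; omega

def accumulate_beats_alt (b : List (List Int)) : List (List Int) :=
  b.map abAltLine

-- ===== PRECONDITION & SPEC =====
def Spec_accumulate_beats (b : List (List Int)) (out : List (List Int)) : Prop := out = accumulate_beats_alt b
instance (b : List (List Int)) (out : List (List Int)) : Decidable (Spec_accumulate_beats b out) := by unfold Spec_accumulate_beats; infer_instance

-- ===== CLAIM (what is proved, stated in full; the proofs are below) =====
def Claim_equal_accumulate_beats : Prop := ∀ (b : List (List Int)), Dom_accumulate_beats b → Spec_accumulate_beats b (accumulate_beats b)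

-- ===== LEMMAS AND PROOFS =====

-- pure version of A's inner loop: successive counters starting from c
def gCnt (c : Int) : List Int → List Int
  | [] => []
  | x :: xs =>
    let c' : Int := if x > 0 then 0 else c + 1
    c' :: gCnt c' xs

theorem abLine_foldl (line : List Int) (accum : List Int) (c : Int) :
    (line.foldl (fun (st : List Int × Int) x =>
      let counter : Int := if x > 0 then 0 else st.2 + 1
      (st.1 ++ [counter], counter)) (accum, c)).1 = accum ++ gCnt c line := by
  induction line generalizing accum c with
  | nil => simp [gCnt]
  | cons x xs ih => simp [gCnt, ih, List.append_assoc]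

theorem abLine_eq_gCnt (line : List Int) : abLine line = gCnt 0 line := by
  simpa using abLine_foldl line [] 0

-- a beat run contributes zeros, regardless of the incoming counter value onwards stays 0
theorem gCnt_beats (run rest : List Int) (c : Int) (h : ∀ y ∈ run, y > 0) :
    gCnt c (run ++ rest) = List.replicate run.length (0 : Int) ++
      (if run = [] then gCnt c rest else gCnt 0 rest) := by
  induction run generalizing c with
  | nil => simp
  | cons y ys ih =>
    have hy : y > 0 := h y (by simp)
    simp only [List.cons_append, gCnt, if_pos hy]
    rw [ih 0 (fun z hz => h z (by simp [hz]))]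
    cases ys <;> simp [List.replicate_succ]

-- a silence run counts up from c+1
theorem gCnt_silence (run rest : List Int) (c : Int) (h : ∀ y ∈ run, ¬ y > 0) :
    gCnt c (run ++ rest) = (List.range run.length).map (fun i : Nat => c + 1 + (i : Int)) ++
      gCnt (c + run.length) rest := by
  induction run generalizing c with
  | nil => simp
  | cons y ys ih =>
    have hy : ¬ y > 0 := h y (by simp)
    simp only [List.cons_append, gCnt, if_neg hy]
    rw [ih (c + 1) (fun z hz => h z (by simp [hz]))]
    rw [List.length_cons, List.range_succ_eq_map]
    simp only [List.map_cons, List.map_map, List.cons_append]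
    congr 1
    · norm_num
    congr 1
    · apply List.map_congr_left
      intro i _
      simp [Function.comp]; ring
    · congr 1; push_cast; ring

-- if the rest starts with a beat (or is empty), the incoming counter is irrelevant
theorem gCnt_restart (rest : List Int) (c : Int)
    (h : rest = [] ∨ ∃ y ys, rest = y :: ys ∧ y > 0) :
    gCnt c rest = gCnt 0 rest := by
  rcases h with h | ⟨y, ys, rfl, hy⟩
  · simp [h, gCnt]
  · simp [gCnt, if_pos hy]

theorem dropWhile_spec (p : Int → Bool) (xs : List Int) :
    xs.dropWhile p = [] ∨ ∃ y ys, xs.dropWhile p = y :: ys ∧ p y = false := by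
  induction xs with
  | nil => simp
  | cons x xs ih =>
    by_cases hx : p x = true
    · simpa [List.dropWhile, hx] using ih
    · exact Or.inr ⟨x, xs, by simp [List.dropWhile, hx], by simpa using hx⟩

theorem gCnt_beat_case (x : Int) (run rest : List Int) (hb : x > 0)
    (hall : ∀ y ∈ run, y > 0) :
    gCnt 0 (x :: (run ++ rest)) = List.replicate (run.length + 1) (0 : Int) ++ gCnt 0 rest := by
  simp only [gCnt, if_pos hb]
  rw [gCnt_beats run rest 0 hall]
  cases run with
  | nil => simp [List.replicate_succ]
  | cons r rs => simp [List.replicate_succ]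

theorem gCnt_silence_case (x : Int) (run rest : List Int) (hb : ¬ x > 0)
    (hall : ∀ y ∈ run, ¬ y > 0)
    (hrestart : rest = [] ∨ ∃ y ys, rest = y :: ys ∧ y > 0) :
    gCnt 0 (x :: (run ++ rest)) =
      (List.range (run.length + 1)).map (fun i : Nat => (i : Int) + 1) ++ gCnt 0 rest := by
  simp only [gCnt, if_neg hb]
  rw [gCnt_silence run rest (0 + 1) hall, gCnt_restart rest _ hrestart,
    List.range_succ_eq_map]
  simp only [List.map_cons, List.map_map, List.cons_append]
  congr 1
  exact congrArg (· ++ gCnt 0 rest)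
    (List.map_congr_left fun i hi => by simp only [Function.comp_apply]; push_cast; ring)

theorem gCnt_eq_abAltLine (line : List Int) : gCnt 0 line = abAltLine line := by
  induction hn : line.length using Nat.strong_induction_on generalizing line with
  | _ n ih =>
  cases line with
  | nil => simp [gCnt, abAltLine]
  | cons x xs =>
    subst hn
    have hxs : xs = xs.takeWhile (fun y => decide (y > 0) == decide (x > 0)) ++
        xs.dropWhile (fun y => decide (y > 0) == decide (x > 0)) :=
      (xs.takeWhile_append_dropWhile).symm
    have hlen : (xs.dropWhile (fun y => decide (y > 0) == decide (x > 0))).length <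
        (x :: xs).length := by
      have := xs.length_dropWhile_le (fun y => decide (y > 0) == decide (x > 0))
      simp only [List.length_cons]; omega
    have ihrest := ih _ hlen _ rfl
    have hrun : ∀ y ∈ xs.takeWhile (fun y => decide (y > 0) == decide (x > 0)),
        (decide (y > 0) == decide (x > 0)) = true :=
      fun y hy => List.mem_takeWhile_imp (p := fun y => decide (y > 0) == decide (x > 0)) (l := xs) hy
    have hdrop := dropWhile_spec (fun y => decide (y > 0) == decide (x > 0)) xs
    rw [abAltLine]
    by_cases hb : x > 0
    · have hall : ∀ y ∈ xs.takeWhile (fun y => decide (y > 0) == decide (x > 0)), y > 0 := by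
        intro y hy; have := hrun y hy; simp [hb] at this; exact this
      rw [if_pos hb, ← ihrest]
      conv_lhs => rw [hxs]
      exact gCnt_beat_case x _ _ hb hall
    · have hall : ∀ y ∈ xs.takeWhile (fun y => decide (y > 0) == decide (x > 0)), ¬ y > 0 := by
        intro y hy; have := hrun y hy; simp [hb] at this; omega
      have hrestart : xs.dropWhile (fun y => decide (y > 0) == decide (x > 0)) = [] ∨
          ∃ y ys, xs.dropWhile (fun y => decide (y > 0) == decide (x > 0)) = y :: ys ∧ y > 0 := by
        rcases hdrop with h | ⟨y, ys, hy, hpy⟩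
        · exact Or.inl h
        · right; refine ⟨y, ys, hy, ?_⟩
          simp [hb] at hpy; exact hpy
      rw [if_neg hb, ← ihrest]
      conv_lhs => rw [hxs]
      exact gCnt_silence_case x _ _ hb hall hrestart

theorem foldl_append_map (b : List (List Int)) (acc : List (List Int)) :
    b.foldl (fun final line => final ++ [abLine line]) acc = acc ++ b.map abLine := by
  induction b generalizing acc with
  | nil => simp
  | cons l ls ih => simp [ih, List.append_assoc]

-- ===== VERDICT (by name: the statement is the Claim_ definition above) =====
theorem accumulate_beats_spec : Claim_equal_accumulate_beats := by
  intro b _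
  unfold Spec_accumulate_beats accumulate_beats accumulate_beats_alt
  rw [foldl_append_map]
  simp only [List.nil_append]
  exact List.map_congr_left (fun l _ => by rw [abLine_eq_gCnt, gCnt_eq_abAltLine])
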